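-- pv_equiv track=rewrite | github.com/tpeterb/State-space-representations | huszarok.py | rakovetkezo
-- ===== SOURCE A (Python) =====
-- def rakovetkezo(allapot):
--     lepesek = []
--     s = allapot[8]
--
--     for i in range(1, 9):
--         elofeltetel = True
--         for sor in range(1, s):
--             if (abs(sor - s) == 2 and abs(allapot[sor - 1] - i) == 1) or (abs(sor - s) == 1 and abs(allapot[sor - 1] - i) == 2):
--                 elofeltetel = False
--                 break
--             else:
--                 elofeltetel = True
--
--         if elofeltetel:
--             uj_allapot = list(allapot)
--             uj_allapot[s - 1] = i
--             uj_allapot[8] = s + 1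
--             uj_allapot2 = tuple(uj_allapot)
--             lepesek.append(uj_allapot2)
--
--     return lepesek
-- ===== SOURCE B (Python) =====
-- def rakovetkezo(allapot):
--     s = allapot[8]
--     forbidden = set()
--     if s >= 3:
--         forbidden.update((allapot[s - 3] - 1, allapot[s - 3] + 1))
--     if s >= 2:
--         forbidden.update((allapot[s - 2] - 2, allapot[s - 2] + 2))
--     lepesek = []
--     for i in range(1, 9):
--         if i not in forbidden:
--             uj = list(allapot)
--             uj[s - 1] = i
--             uj[8] = s + 1
--             lepesek.append(tuple(uj))
--     return lepesek
-- ===== Notes on version B (the rewrite author's own statement) =====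
-- stated objective: simpler
-- what changed: B precomputes the (at most four) forbidden columns from the previous two rows once, replacing A's per-column inner scan over all previous rows with a single set-membership test.
import Mathlib
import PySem

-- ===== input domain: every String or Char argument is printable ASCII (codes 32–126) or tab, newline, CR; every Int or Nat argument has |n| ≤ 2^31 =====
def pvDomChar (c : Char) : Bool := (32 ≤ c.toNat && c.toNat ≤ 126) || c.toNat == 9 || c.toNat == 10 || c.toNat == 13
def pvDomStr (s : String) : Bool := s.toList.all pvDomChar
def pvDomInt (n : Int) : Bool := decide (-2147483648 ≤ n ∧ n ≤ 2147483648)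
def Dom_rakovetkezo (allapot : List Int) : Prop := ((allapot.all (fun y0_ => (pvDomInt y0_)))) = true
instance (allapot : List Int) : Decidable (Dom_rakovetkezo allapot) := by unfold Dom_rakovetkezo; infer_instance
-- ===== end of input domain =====

-- B replaces A's inner scan over all previous rows by a precomputed set of forbidden columns (simpler: one membership test per column).

-- ===== PORT A =====
-- A's main loop over i = 1..8, with s = allapot[8] passed in (helper so that s is bound once, as in the Python)
def rakLoopA (allapot : List Int) (s : Int) : List (List Int) :=
  (PySem.List.pyRange 1 9 1).foldl (fun lepesek i =>
    let elofeltetel := !((PySem.List.pyRange 1 s 1).any (fun sor =>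
      ((sor - s).natAbs == 2 && ((PySem.List.pyGetD allapot (sor - 1) 0) - i).natAbs == 1) ||
      ((sor - s).natAbs == 1 && ((PySem.List.pyGetD allapot (sor - 1) 0) - i).natAbs == 2)))
    if elofeltetel then
      lepesek ++ [PySem.List.pySetD (PySem.List.pySetD allapot (s - 1) i) 8 (s + 1)]
    else lepesek) []

-- s = allapot[8]; matching on the Int constructor binds s strictly (same value as a plain
-- let — it only keeps kernel evaluation of the loop from re-reducing the lookup term)
def rakovetkezo (allapot : List Int) : List (List Int) :=
  match PySem.List.pyGetD allapot 8 0 with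
  | .ofNat n => rakLoopA allapot (.ofNat n)
  | .negSucc n => rakLoopA allapot (.negSucc n)

-- ===== PORT B =====
-- B's forbidden-column set, built from the previous two rows (s passed in as in Source B)
def rakForbidden (allapot : List Int) (s : Int) : PySem.Set Int :=
  let f0 : PySem.Set Int := PySem.Set.empty
  let f1 : PySem.Set Int := if 3 ≤ s then
      PySem.Set.update f0 [PySem.List.pyGetD allapot (s - 3) 0 - 1, PySem.List.pyGetD allapot (s - 3) 0 + 1]
    else f0
  if 2 ≤ s then
      PySem.Set.update f1 [PySem.List.pyGetD allapot (s - 2) 0 - 2, PySem.List.pyGetD allapot (s - 2) 0 + 2]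
    else f1

-- B's single pass over the columns 1..8 with one membership test each
def rakLoopB (allapot : List Int) (s : Int) (forbidden : PySem.Set Int) : List (List Int) :=
  (PySem.List.pyRange 1 9 1).foldl (fun lepesek i =>
    if !(PySem.Set.contains forbidden i) then
      lepesek ++ [PySem.List.pySetD (PySem.List.pySetD allapot (s - 1) i) 8 (s + 1)]
    else lepesek) []

-- B with its row counter s: build the forbidden set once, then the single pass
def rakAltGo (allapot : List Int) (s : Int) : List (List Int) :=
  rakLoopB allapot s (rakForbidden allapot s)

-- s = allapot[8] bound strictly, as in the A port
def rakovetkezo_alt (allapot : List Int) : List (List Int) :=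
  match PySem.List.pyGetD allapot 8 0 with
  | .ofNat n => rakAltGo allapot (.ofNat n)
  | .negSucc n => rakAltGo allapot (.negSucc n)

-- ===== PRECONDITION & SPEC =====
-- Pre_: exactly the inputs on which the Python A returns normally: the list is long enough
-- for the row-counter lookup at index eight, and that counter lies in the index range, so that
-- neither the inner-scan lookups nor the placement assignment raise IndexError.
def Pre_rakovetkezo (allapot : List Int) : Prop :=
  9 ≤ allapot.length ∧ 1 - (allapot.length : Int) ≤ allapot.getD 8 0 ∧ allapot.getD 8 0 ≤ (allapot.length : Int)
instance (allapot : List Int) : Decidable (Pre_rakovetkezo allapot) := by unfold Pre_rakovetkezo; infer_instance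

def pvWitness_rakovetkezo : List Int := [1, 0, 0, 0, 0, 0, 0, 0, 2]

def Spec_rakovetkezo (allapot : List Int) (out : List (List Int)) : Prop := out = rakovetkezo_alt allapot
instance (allapot : List Int) (out : List (List Int)) : Decidable (Spec_rakovetkezo allapot out) := by unfold Spec_rakovetkezo; infer_instance

-- ===== CLAIM (what is proved, stated in full; the proofs are below) =====
def Claim_equal_rakovetkezo : Prop := ∀ (allapot : List Int), Dom_rakovetkezo allapot → Pre_rakovetkezo allapot → Spec_rakovetkezo allapot (rakovetkezo allapot)

-- ===== LEMMAS AND PROOFS =====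

-- conflict scan, case 3 ≤ s: a hit exists iff i is one of the four forbidden columns
lemma pv_aux3 (g : Int → Int) (s i : Int) (hs : 3 ≤ s) :
    (∃ sor, (1 ≤ sor ∧ sor < s) ∧ (((sor - s).natAbs = 2 ∧ (g (sor - 1) - i).natAbs = 1) ∨ ((sor - s).natAbs = 1 ∧ (g (sor - 1) - i).natAbs = 2)))
    ↔ ((i = g (s - 3) - 1 ∨ i = g (s - 3) + 1) ∨ (i = g (s - 2) - 2 ∨ i = g (s - 2) + 2)) := by
  constructor
  · rintro ⟨sor, ⟨h1, h2⟩, ⟨ha, hb⟩ | ⟨ha, hb⟩⟩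
    · have hso : sor = s - 2 := by omega
      subst hso
      rw [show s - 2 - 1 = s - 3 by ring] at hb
      left; omega
    · have hso : sor = s - 1 := by omega
      subst hso
      rw [show s - 1 - 1 = s - 2 by ring] at hb
      right; omega
  · rintro (h | h)
    · exact ⟨s - 2, ⟨by omega, by omega⟩, Or.inl ⟨by omega, by rw [show s - 2 - 1 = s - 3 by ring]; omega⟩⟩
    · exact ⟨s - 1, ⟨by omega, by omega⟩, Or.inr ⟨by omega, by rw [show s - 1 - 1 = s - 2 by ring]; omega⟩⟩

-- conflict scan, case s = 2: only sor = 1 is scanned and only the distance-2 test can fire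
lemma pv_aux2 (g : Int → Int) (i : Int) :
    (∃ sor, (1 ≤ sor ∧ sor < 2) ∧ (((sor - 2).natAbs = 2 ∧ (g (sor - 1) - i).natAbs = 1) ∨ ((sor - 2).natAbs = 1 ∧ (g (sor - 1) - i).natAbs = 2)))
    ↔ (i = g 0 - 2 ∨ i = g 0 + 2) := by
  constructor
  · rintro ⟨sor, ⟨h1, h2⟩, ⟨ha, hb⟩ | ⟨ha, hb⟩⟩
    · omega
    · have hso : sor = 1 := by omega
      subst hso
      rw [show (1 : Int) - 1 = 0 by ring] at hb
      omega
  · intro h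
    exact ⟨1, ⟨le_refl 1, by omega⟩, Or.inr ⟨by omega, by rw [show (1 : Int) - 1 = 0 by ring]; omega⟩⟩

-- A's inner scan finds a conflict iff the column i is in B's forbidden set.
lemma pv_cond_eq (allapot : List Int) (s i : Int) :
    ((PySem.List.pyRange 1 s 1).any (fun sor =>
      ((sor - s).natAbs == 2 && ((PySem.List.pyGetD allapot (sor - 1) 0) - i).natAbs == 1) ||
      ((sor - s).natAbs == 1 && ((PySem.List.pyGetD allapot (sor - 1) 0) - i).natAbs == 2)))
    = PySem.Set.contains (rakForbidden allapot s) i := by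
  unfold rakForbidden
  rcases lt_or_ge s 2 with hs | hs
  · rw [PySem.List.pyRange_one_eq_nil (by omega)]
    simp only [if_neg (show ¬ (2 : Int) ≤ s by omega), if_neg (show ¬ (3 : Int) ≤ s by omega)]
    simp [PySem.Set.empty, PySem.Set.contains]
  · rw [Bool.eq_iff_iff]
    simp only [List.any_eq_true, PySem.List.mem_pyRange_one, Bool.or_eq_true, Bool.and_eq_true,
      beq_iff_eq, PySem.Set.contains_iff]
    rcases lt_or_ge s 3 with hs3 | hs3
    · have h2 : s = 2 := by omega
      subst h2
      rw [if_pos (le_refl (2 : Int)), if_neg (by omega)]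
      simp only [PySem.Set.mem_update, PySem.Set.empty, List.not_mem_nil, List.mem_cons, false_or,
        or_false]
      have := pv_aux2 (fun j => PySem.List.pyGetD allapot j 0) i
      simp only [] at this
      rw [show (2 : Int) - 2 = 0 by ring]
      constructor
      · rintro ⟨sor, hr, hc⟩; exact this.mp ⟨sor, hr, hc⟩
      · intro h; exact this.mpr h
    · rw [if_pos hs, if_pos hs3]
      simp only [PySem.Set.mem_update, PySem.Set.empty, List.not_mem_nil, List.mem_cons, false_or,
        or_false]
      have := pv_aux3 (fun j => PySem.List.pyGetD allapot j 0) s i hs3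
      simp only [] at this
      constructor
      · rintro ⟨sor, hr, hc⟩
        rcases this.mp ⟨sor, hr, hc⟩ with h | h
        · exact Or.inl h
        · exact Or.inr h
      · intro h
        apply this.mpr
        tauto


lemma pv_loop_eq (allapot : List Int) (s : Int) :
    rakLoopA allapot s = rakAltGo allapot s := by
  unfold rakLoopA rakAltGo rakLoopB
  simp only [pv_cond_eq]

theorem rakovetkezo_spec : Claim_equal_rakovetkezo := by
  intro allapot _ _
  unfold Spec_rakovetkezo rakovetkezo rakovetkezo_alt
  cases h : PySem.List.pyGetD allapot 8 0
  · exact pv_loop_eq _ _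
  · exact pv_loop_eq _ _
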